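-- pv_equiv track=rewrite | github.com/MoritzHauer/advent-of-code | 2025/Python/d05/d05.py | parse_worksheet
-- ===== SOURCE A (Python) =====
-- def extract_problem(padded_lines, column_indices):
--     """
--     Extract a problem from the padded lines given column indices.
--
--     Args:
--         padded_lines: List of strings padded to the same width
--         column_indices: List of column indices that form this problem
--
--     Returns:
--         Tuple of (numbers_list, operation)
--     """
--     problem_numbers = []
--
--     for row in range(len(padded_lines) - 1):
--         # Extract number from this row
--         num_str = ''.join(padded_lines[row][c] for c in column_indices).strip()
--         if num_str:
--             problem_numbers.append(int(num_str))
--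
--     # Get the operation from the last row
--     op_str = ''.join(padded_lines[-1][c] for c in column_indices).strip()
--     operation = op_str
--
--     return (problem_numbers, operation)
--
-- def parse_worksheet(input_text):
--     """
--     Parse the math worksheet into individual problems.
--
--     Each problem's numbers are arranged vertically, with the operation at the bottom.
--     Problems are separated by full columns of spaces.
--
--     Args:
--         input_text: Multi-line string representing the worksheet
--
--     Returns:
--         List of tuples (numbers_list, operation) for each problem
--     """
--     lines = input_text.strip().split('\n')
--
--     # Determine the width of the worksheet
--     max_width = max(len(line) for line in lines)
--
--     # Pad all lines to the same width
--     padded_lines = [line.ljust(max_width) for line in lines]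
--
--     # Find problem boundaries (columns that are entirely spaces except for the operator)
--     problems = []
--     current_problem = []
--
--     col = 0
--     while col < max_width:
--         # Check if this column is the start or part of a problem
--         # A column is part of a problem if any non-last row has a non-space character
--         is_problem_col = any(padded_lines[row][col] != ' ' for row in range(len(padded_lines)))
--
--         if is_problem_col:
--             # Start or continue a problem
--             current_problem.append(col)
--         else:
--             # End of a problem (separator column)
--             if current_problem:
--                 problems.append(extract_problem(padded_lines, current_problem))
--                 current_problem = []
--
--         col += 1
--
--     # Handle the last problem if it exists
--     if current_problem:
--         problems.append(extract_problem(padded_lines, current_problem))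
--
--     return problems
-- ===== SOURCE B (Python) =====
-- def parse_worksheet(input_text):
--     """Parse the worksheet by transposing it into columns and scanning runs of
--     non-blank columns with two pointers (same result as the index-accumulator version)."""
--     lines = input_text.strip().split('\n')
--     width = max(len(line) for line in lines)
--     rows = [line.ljust(width) for line in lines]
--     cols = list(zip(*rows))
--     problems = []
--     i, n = 0, len(cols)
--     while i < n:
--         if all(ch == ' ' for ch in cols[i]):
--             i += 1
--             continue
--         j = i
--         while j < n and not all(ch == ' ' for ch in cols[j]):
--             j += 1
--         block = cols[i:j]
--         texts = [''.join(t).strip() for t in zip(*block)]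
--         numbers = [int(s) for s in texts[:-1] if s]
--         problems.append((numbers, texts[-1]))
--         i = j
--     return problems
-- ===== Notes on version B (the rewrite author's own statement) =====
-- stated objective: idiomatic
-- what changed: Instead of tracking an accumulator list of column indices flushed on separator columns and re-indexing the grid per cell, B transposes the padded grid into column tuples once and scans them with two pointers, slicing each run and re-transposing it into row strings.
import Mathlib
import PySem

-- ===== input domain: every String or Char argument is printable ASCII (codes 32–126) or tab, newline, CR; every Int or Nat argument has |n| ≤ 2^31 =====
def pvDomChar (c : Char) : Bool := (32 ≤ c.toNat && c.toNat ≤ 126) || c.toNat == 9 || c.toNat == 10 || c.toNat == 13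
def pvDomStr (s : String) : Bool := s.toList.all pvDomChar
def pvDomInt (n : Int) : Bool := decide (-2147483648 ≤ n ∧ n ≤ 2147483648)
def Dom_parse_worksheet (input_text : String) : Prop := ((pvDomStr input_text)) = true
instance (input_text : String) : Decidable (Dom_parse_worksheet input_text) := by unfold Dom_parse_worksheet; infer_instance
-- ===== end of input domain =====

-- B transposes the padded grid into columns and scans runs of non-blank columns with
-- two pointers, instead of A's index-accumulator flushed on separator columns; same result.

-- Shared prologue (both Pythons start with the same three lines: strip, split('\n'), max width, ljust-pad):
def pwLines (input_text : String) : List (List Char) :=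
  PySem.Chars.splitOn (PySem.Chars.strip input_text.toList) ['\n']

def pwMaxWidth (lines : List (List Char)) : Int :=
  (PySem.List.max? (lines.map PySem.List.len) id).getD 0

-- line.ljust(w): pad on the right with spaces, never truncate (exact port of str.ljust)
def pwLjust (line : List Char) (w : Int) : List Char :=
  line ++ List.replicate (w - PySem.List.len line).toNat ' '

-- ===== PORT A =====
def extract_problem (padded_lines : List (List Char)) (column_indices : List Int) : List Int × String :=
  let problem_numbers :=
    (PySem.List.pyRange 0 (PySem.List.len padded_lines - 1) 1).foldl (fun acc row =>
      let num_str := PySem.Chars.strip (column_indices.map (fun c =>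
        PySem.List.pyGetD (PySem.List.pyGetD padded_lines row []) c ' '))
      if num_str ≠ [] then acc ++ [(PySem.Int.ofChars? num_str).getD 0] else acc) []
  let op_str := PySem.Chars.strip (column_indices.map (fun c =>
        PySem.List.pyGetD (PySem.List.pyGetD padded_lines (-1) []) c ' '))
  (problem_numbers, String.ofList op_str)

def parse_worksheet (input_text : String) : List (List Int × String) :=
  let lines := pwLines input_text
  let max_width := pwMaxWidth lines
  let padded_lines := lines.map (fun line => pwLjust line max_width)
  -- while col < max_width, carrying (problems, current_problem):
  let res := (PySem.List.pyRange 0 max_width 1).foldl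
    (fun (st : List (List Int × String) × List Int) col =>
      let is_problem_col := (PySem.List.pyRange 0 (PySem.List.len padded_lines) 1).any
        (fun row => PySem.List.pyGetD (PySem.List.pyGetD padded_lines row []) col ' ' != ' ')
      if is_problem_col then (st.1, st.2 ++ [col])
      else if st.2 ≠ [] then (st.1 ++ [extract_problem padded_lines st.2], [])
      else st) ([], [])
  if res.2 ≠ [] then res.1 ++ [extract_problem padded_lines res.2] else res.1

-- ===== PORT B =====
def pwAllSpace (col : List Char) : Bool := col.all (fun ch => ch == ' ')

-- zip(*xss): the tuples of k-th entries, k below the shortest length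
def pwZipStar (xss : List (List Char)) : List (List Char) :=
  (List.range ((PySem.List.min? (xss.map List.length) id).getD 0)).map
    (fun k => xss.map (fun xs => xs.getD k ' '))

def pwEmit (block : List (List Char)) : List Int × String :=
  let texts := (pwZipStar block).map PySem.Chars.strip
  let numbers := texts.dropLast.filterMap (fun s =>
    if s = [] then none else some ((PySem.Int.ofChars? s).getD 0))
  (numbers, String.ofList (texts.getLast?.getD []))

def pwScan : List (List Char) → List (List Int × String)
  | [] => []
  | c :: rest =>
    if pwAllSpace c then pwScan rest
    else pwEmit (c :: rest.takeWhile (fun d => !pwAllSpace d))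
         :: pwScan (rest.dropWhile (fun d => !pwAllSpace d))
termination_by l => l.length
decreasing_by
  · simp
  · simp only [List.length_cons]
    exact Nat.lt_succ_of_le (List.length_dropWhile_le _ _)

def parse_worksheet_alt (input_text : String) : List (List Int × String) :=
  let lines := pwLines input_text
  let width := pwMaxWidth lines
  let rows := lines.map (fun line => pwLjust line width)
  pwScan (pwZipStar rows)

-- ===== PRECONDITION & SPEC =====
def pwColBlank (P : List (List Char)) (c : Nat) : Bool :=
  P.all (fun row => row.getD c ' ' == ' ')

def pwCell (P : List (List Char)) (r i j : Nat) : List Char :=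
  PySem.Chars.strip ((List.range (j + 1 - i)).map (fun k => (P.getD r []).getD (i + k) ' '))

-- Pre_ excludes exactly the inputs on which A (and B alike) raises ValueError: some maximal
-- run of non-blank columns has a number row that strips to a nonempty non-integer token.
-- every number cell of every maximal non-blank column run [i..j] parses as an int (or is empty)
def pwPreOk (P : List (List Char)) : Prop :=
  ∀ i ∈ List.range (P.headD []).length, ∀ j ∈ List.range (P.headD []).length, i ≤ j →
    (∀ k ∈ List.range (P.headD []).length, i ≤ k → k ≤ j → pwColBlank P k = false) →
    (i = 0 ∨ pwColBlank P (i - 1) = true) →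
    (j + 1 = (P.headD []).length ∨ pwColBlank P (j + 1) = true) →
    ∀ r ∈ List.range P.length, r + 1 < P.length →
      pwCell P r i j = [] ∨ (PySem.Int.ofChars? (pwCell P r i j)).isSome = true

def Pre_parse_worksheet (input_text : String) : Prop :=
  pwPreOk ((pwLines input_text).map (fun line => pwLjust line (pwMaxWidth (pwLines input_text))))

instance (input_text : String) : Decidable (Pre_parse_worksheet input_text) := by
  unfold Pre_parse_worksheet pwPreOk; infer_instance

def pvWitness_parse_worksheet : String := "12 3\n 4 5\n+  *"

def Spec_parse_worksheet (input_text : String) (out : List (List Int × String)) : Prop := out = parse_worksheet_alt input_text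
instance (input_text : String) (out : List (List Int × String)) : Decidable (Spec_parse_worksheet input_text out) := by unfold Spec_parse_worksheet; infer_instance

-- ===== CLAIM (what is proved, stated in full; the proofs are below) =====
def Claim_equal_parse_worksheet : Prop := ∀ (input_text : String), Dom_parse_worksheet input_text → Pre_parse_worksheet input_text → Spec_parse_worksheet input_text (parse_worksheet input_text)

-- ===== LEMMAS AND PROOFS =====

-- the column of P at index k, as B's transpose produces it
def pwCol (P : List (List Char)) (k : Nat) : List Char := P.map (fun row => row.getD k ' ')

-- "column k touches a non-space char", as A tests it
def pwNB (P : List (List Char)) (k : Nat) : Bool := P.any (fun row => row.getD k ' ' != ' ')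

-- A's loop, rephrased over Nat column indices (reference recursion)
def pwCont (P : List (List Char)) : List Nat → List Nat → List (List Int × String)
  | cur, [] => if cur = [] then [] else [extract_problem P (cur.map (fun k : Nat => (k : Int)))]
  | cur, k :: ks =>
    if pwNB P k then pwCont P (cur ++ [k]) ks
    else if cur = [] then pwCont P [] ks
    else extract_problem P (cur.map (fun k : Nat => (k : Int))) :: pwCont P [] ks

theorem range_any_getD {α : Type} (P : List α) (d : α) (q : α → Bool) :
    ((List.range P.length).any fun r => q (P.getD r d)) = P.any q := by
  induction P with
  | nil => simp
  | cons a t ih =>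
    simp only [List.length_cons, List.range_succ_eq_map, List.any_cons, List.any_map,
      Function.comp_def, List.getD_cons_succ, List.getD_cons_zero, Nat.succ_eq_add_one]
    rw [ih]

theorem nb_eq_not_allspace (P : List (List Char)) (k : Nat) :
    pwNB P k = !pwAllSpace (pwCol P k) := by
  simp only [pwNB, pwAllSpace, pwCol, List.all_map, List.any_eq_not_all_not]
  simp [Function.comp_def, bne]

theorem min?_replicate_succ (n : Nat) (W : Nat) :
    PySem.List.min? (List.replicate (n + 1) W) id = some W := by
  rw [List.replicate_succ]
  unfold PySem.List.min?
  simp only [List.foldl_cons]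
  induction n with
  | zero => rfl
  | succ m ih => rw [List.replicate_succ, List.foldl_cons]; simpa using ih

theorem zipStar_eq_map_col (P : List (List Char)) (W : Nat) (hP : P ≠ [])
    (hlen : ∀ row ∈ P, row.length = W) :
    pwZipStar P = (List.range W).map (pwCol P) := by
  have hrep : P.map List.length = List.replicate P.length W := by
    rw [List.eq_replicate_iff]
    constructor
    · simp
    · intro b hb
      obtain ⟨row, hrow, rfl⟩ := List.mem_map.mp hb
      exact hlen row hrow
  obtain ⟨r0, rest, rfl⟩ : ∃ r0 rest, P = r0 :: rest := by
    cases P with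
    | nil => exact absurd rfl hP
    | cons a t => exact ⟨a, t, rfl⟩
  unfold pwZipStar
  rw [hrep]
  simp only [List.length_cons, min?_replicate_succ, Option.getD_some]
  rfl

theorem zipStar_nil : pwZipStar [] = [] := by
  simp [pwZipStar, PySem.List.min?]

-- a column read at row r is the grid read at row r, column k (both defaulting to a space)
theorem getD_map_col (P : List (List Char)) (r k : Nat) :
    (pwCol P k).getD r ' ' = (P.getD r []).getD k ' ' := by
  simp only [pwCol, List.getD_eq_getElem?_getD, List.getElem?_map]
  cases P[r]? with
  | none => rfl
  | some row => rfl

-- A's append-if fold over a range = B's filterMap over the mapped range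
theorem foldl_if_eq_filterMap (g : List Char → Int) (t : Nat → List Char) (m : Nat) :
    ∀ acc : List Int,
      (List.range m).foldl (fun acc r => if t r ≠ [] then acc ++ [g (t r)] else acc) acc
      = acc ++ ((List.range m).map t).filterMap
          (fun s => if s = [] then none else some (g s)) := by
  induction m with
  | zero => simp
  | succ m ih =>
    intro acc
    rw [List.range_succ, List.foldl_append, ih acc, List.map_append, List.filterMap_append]
    simp only [List.foldl_cons, List.foldl_nil, List.map_cons, List.map_nil,
      List.filterMap_cons, List.filterMap_nil]
    by_cases h : t m = []
    · rw [if_neg (by simpa using h), if_pos h]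
      simp
    · rw [if_pos h, if_neg h]
      simp

-- the row-r text of the run given by index list ks
def pwText (P : List (List Char)) (ks : List Nat) (r : Nat) : List Char :=
  PySem.Chars.strip (ks.map (fun k => (P.getD r []).getD k ' '))

-- extraction over an index list = emit over the corresponding columns
theorem extract_eq_emit (P : List (List Char)) (hP : P ≠ []) (ks : List Nat) :
    extract_problem P (ks.map (fun k : Nat => (k : Int))) = pwEmit (ks.map (pwCol P)) := by
  obtain ⟨n, hn⟩ : ∃ n, P.length = n + 1 := by
    cases P with
    | nil => exact absurd rfl hP
    | cons a t => exact ⟨t.length, rfl⟩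
  have hinner : ∀ row : List Char,
      (ks.map (fun k : Nat => (k : Int))).map (fun c => PySem.List.pyGetD row c ' ')
        = ks.map (fun k => row.getD k ' ') := by
    intro row
    rw [List.map_map]
    apply List.map_congr_left
    intro k _
    simp
  have hlastD : P.getLast hP = P.getD n [] := by
    have h1 : P[n]? = P.getLast? := by
      rw [List.getLast?_eq_getElem?, hn]
      simp
    rw [List.getD_eq_getElem?_getD, h1, List.getLast?_eq_some_getLast hP]
    rfl
  have hA : extract_problem P (ks.map (fun k : Nat => (k : Int)))
      = (((List.range n).map (pwText P ks)).filterMap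
          (fun s => if s = [] then none else some ((PySem.Int.ofChars? s).getD 0)),
         String.ofList (pwText P ks n)) := by
    unfold extract_problem
    rw [PySem.List.len_eq, hn]
    rw [show ((↑(n + 1) : Int) - 1) = (n : Int) from by push_cast; ring]
    rw [PySem.List.pyRange_zero_natCast, List.foldl_map]
    rw [PySem.List.pyGetD_neg_one P [] hP, hlastD]
    simp only [PySem.List.pyGetD_natCast, hinner]
    simp only [← pwText.eq_def]
    rw [foldl_if_eq_filterMap (fun s => (PySem.Int.ofChars? s).getD 0) (pwText P ks) n []]
    rw [List.nil_append]
  rw [hA]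
  cases ks with
  | nil =>
    have hstrip : pwText P ([] : List Nat) = fun _ => ([] : List Char) := by
      funext r; simp only [pwText, List.map_nil]; rfl
    rw [hstrip]
    simp [pwEmit, pwZipStar, PySem.List.min?]
  | cons k0 ks' =>
    have hcols : ((k0 :: ks').map (pwCol P)).map List.length
        = List.replicate (k0 :: ks').length (n + 1) := by
      rw [List.eq_replicate_iff]
      constructor
      · simp
      · intro b hb
        simp only [List.map_map, List.mem_map] at hb
        obtain ⟨k, _, rfl⟩ := hb
        simp [pwCol, hn]
    unfold pwEmit pwZipStar
    rw [hcols]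
    simp only [List.length_cons, min?_replicate_succ, Option.getD_some, List.map_map]
    have htexts : (List.range (n + 1)).map
        (PySem.Chars.strip ∘ fun r => (k0 :: ks').map ((fun xs => xs.getD r ' ') ∘ pwCol P))
        = (List.range (n + 1)).map (pwText P (k0 :: ks')) := by
      apply List.map_congr_left
      intro r _
      simp only [Function.comp_def, pwText]
      congr 1
      apply List.map_congr_left
      intro k _
      exact getD_map_col P r k
    rw [htexts, List.range_succ, List.map_append, List.map_cons, List.map_nil]
    rw [List.dropLast_concat, List.getLast?_concat]
    rfl

-- flush lemma: a non-empty open run is closed by the first blank column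
theorem cont_flush (P : List (List Char)) (ks : List Nat) :
    ∀ cur, cur ≠ [] →
      pwCont P cur ks
        = extract_problem P ((cur ++ ks.takeWhile (pwNB P)).map (fun k : Nat => (k : Int)))
          :: pwCont P [] (ks.dropWhile (pwNB P)) := by
  induction ks with
  | nil => intro cur h; simp [pwCont, h]
  | cons k ks ih =>
    intro cur h
    by_cases hk : pwNB P k
    · simp only [pwCont, hk, if_pos, List.takeWhile_cons_of_pos, List.dropWhile_cons_of_pos]
      rw [ih (cur ++ [k]) (by simp)]
      simp
    · simp only [pwCont, hk]
      simp [h, hk, List.takeWhile_cons_of_neg, List.dropWhile_cons_of_neg, pwCont]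

-- B's scan over columns = the reference recursion
theorem scan_eq_cont (P : List (List Char)) (hP : P ≠ []) (ks : List Nat) :
    pwScan (ks.map (pwCol P)) = pwCont P [] ks := by
  have hpred : ((fun d => !pwAllSpace d) ∘ pwCol P) = pwNB P := by
    funext k
    simp [nb_eq_not_allspace]
  have H : ∀ n (ks : List Nat), ks.length ≤ n → pwScan (ks.map (pwCol P)) = pwCont P [] ks := by
    intro n
    induction n with
    | zero =>
      intro ks hks
      rw [List.length_eq_zero_iff.mp (Nat.le_zero.mp hks)]
      simp [pwScan, pwCont]
    | succ n ih =>
      intro ks hks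
      cases ks with
      | nil => simp [pwScan, pwCont]
      | cons k ks' =>
        simp only [List.map_cons]
        rw [pwScan]
        by_cases hk : pwNB P k
        · have hb : pwAllSpace (pwCol P k) = false := by
            have := nb_eq_not_allspace P k
            rw [hk] at this
            simpa using this.symm
          rw [if_neg (by simp [hb])]
          rw [List.takeWhile_map, List.dropWhile_map, hpred]
          rw [show pwCol P k :: (ks'.takeWhile (pwNB P)).map (pwCol P)
                = (k :: ks'.takeWhile (pwNB P)).map (pwCol P) from rfl]
          rw [← extract_eq_emit P hP (k :: ks'.takeWhile (pwNB P))]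
          rw [ih (ks'.dropWhile (pwNB P))
            (le_trans (List.length_dropWhile_le _ _) (Nat.le_of_succ_le_succ hks))]
          rw [pwCont, if_pos hk]
          rw [show ([] : List Nat) ++ [k] = [k] from rfl, cont_flush P ks' [k] (by simp)]
          rfl
        · have hb : pwAllSpace (pwCol P k) = true := by
            have := nb_eq_not_allspace P k
            rw [Bool.not_eq_true] at hk
            rw [hk] at this
            simpa using this.symm
          rw [if_pos hb]
          rw [ih ks' (Nat.le_of_succ_le_succ hks)]
          rw [pwCont, if_neg (by simp [hk]), if_pos rfl]
  exact H ks.length ks le_rfl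

-- A's step function over Nat column indices
def pwStepN (P : List (List Char)) (st : List (List Int × String) × List Int) (k : Nat) :
    List (List Int × String) × List Int :=
  if pwNB P k then (st.1, st.2 ++ [(k : Int)])
  else if st.2 ≠ [] then (st.1 ++ [extract_problem P st.2], [])
  else st

-- A's fold realizes the reference recursion
theorem fold_eq_cont (P : List (List Char)) (ks : List Nat) :
    ∀ acc cur,
      (let res := ks.foldl (pwStepN P) (acc, cur.map (fun k : Nat => (k : Int)))
       if res.2 ≠ [] then res.1 ++ [extract_problem P res.2] else res.1)
      = acc ++ pwCont P cur ks := by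
  induction ks with
  | nil =>
    intro acc cur
    cases cur with
    | nil => simp [pwCont]
    | cons c cs => simp [pwCont]
  | cons k ks ih =>
    intro acc cur
    simp only [List.foldl_cons]
    by_cases hk : pwNB P k
    · have hstep : pwStepN P (acc, cur.map (fun k : Nat => (k : Int))) k
          = (acc, (cur ++ [k]).map (fun k : Nat => (k : Int))) := by
        simp [pwStepN, hk]
      rw [hstep, ih acc (cur ++ [k]), pwCont, if_pos hk]
    · cases cur with
      | nil =>
        have hstep : pwStepN P (acc, ([] : List Nat).map (fun k : Nat => (k : Int))) k
            = (acc, ([] : List Nat).map (fun k : Nat => (k : Int))) := by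
          simp [pwStepN, hk]
        rw [hstep, ih acc [], pwCont, if_neg (by simp [hk]), if_pos rfl]
      | cons c cs =>
        have hstep : pwStepN P (acc, ((c :: cs).map (fun k : Nat => (k : Int))) ) k
            = (acc ++ [extract_problem P ((c :: cs).map (fun k : Nat => (k : Int)))],
               ([] : List Nat).map (fun k : Nat => (k : Int))) := by
          simp [pwStepN, hk]
        rw [hstep, ih (acc ++ [extract_problem P ((c :: cs).map (fun k : Nat => (k : Int)))]) []]
        rw [pwCont, if_neg (by simp [hk]), if_neg (by simp)]
        simp

theorem max?_cons_isSome {α κ : Type} [LT κ] [DecidableLT κ] (key : α → κ) (x : α) (l : List α) :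
    (PySem.List.max? (x :: l) key).isSome := by
  unfold PySem.List.max?
  rw [List.foldl_cons]
  suffices H : ∀ (l : List α) (m : α),
      (l.foldl (fun acc y => match acc with
        | none => some y
        | some m => if key m < key y then some y else some m) (some m)).isSome by
    exact H l x
  intro l
  induction l with
  | nil => simp
  | cons y l ih =>
    intro m
    rw [List.foldl_cons]
    by_cases h : key m < key y
    · simpa [h] using ih y
    · simpa [h] using ih m

theorem mw_nonneg (L : List (List Char)) : 0 ≤ pwMaxWidth L := by
  unfold pwMaxWidth
  cases h : PySem.List.max? (L.map PySem.List.len) id with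
  | none => simp
  | some m =>
    obtain ⟨l, _, rfl⟩ := List.mem_map.mp (PySem.List.max?_mem h)
    simp [PySem.List.len_eq]

theorem len_le_mw (L : List (List Char)) (hl : L ≠ []) :
    ∀ line ∈ L, PySem.List.len line ≤ pwMaxWidth L := by
  intro line hline
  obtain ⟨x, t, rfl⟩ : ∃ x t, L = x :: t := by
    cases L with
    | nil => exact absurd rfl hl
    | cons a t => exact ⟨a, t, rfl⟩
  have hs := max?_cons_isSome (id : Int → Int) (PySem.List.len x) (t.map PySem.List.len)
  rw [← List.map_cons] at hs
  obtain ⟨m, hm⟩ := Option.isSome_iff_exists.mp hs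
  unfold pwMaxWidth
  rw [hm, Option.getD_some]
  exact PySem.List.max?_isMax hm _ (List.mem_map_of_mem hline)

theorem rows_len (L : List (List Char)) (hl : L ≠ []) :
    ∀ line ∈ L, (pwLjust line (pwMaxWidth L)).length = (pwMaxWidth L).toNat := by
  intro line hline
  have h1 := len_le_mw L hl line hline
  have h0 := mw_nonneg L
  rw [PySem.List.len_eq] at h1
  simp only [pwLjust, List.length_append, List.length_replicate, PySem.List.len_eq]
  omega

-- the two ports agree on every input (unconditionally)
theorem ports_agree (input : String) : parse_worksheet input = parse_worksheet_alt input := by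
  simp only [parse_worksheet, parse_worksheet_alt]
  by_cases hnil : pwLines input = []
  · rw [hnil]
    have h0 : pwMaxWidth ([] : List (List Char)) = 0 := by
      simp [pwMaxWidth, PySem.List.max?]
    rw [h0]
    have hr : PySem.List.pyRange 0 0 1 = [] := by decide
    rw [List.map_nil, hr, zipStar_nil]
    simp [pwScan]
  · set mW := pwMaxWidth (pwLines input) with hmWdef
    have hmw0 : 0 ≤ mW := mw_nonneg _
    have hcast : mW = ((mW.toNat : Nat) : Int) := (Int.toNat_of_nonneg hmw0).symm
    set P := (pwLines input).map (fun line => pwLjust line mW) with hPdef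
    have hPnil : P ≠ [] := by
      rw [hPdef]
      simpa using hnil
    have hrows : ∀ row ∈ P, row.length = mW.toNat := by
      intro row hrow
      rw [hPdef] at hrow
      obtain ⟨line, hline, rfl⟩ := List.mem_map.mp hrow
      exact rows_len _ hnil line hline
    -- B's side: the transpose is the list of columns, and the scan is the reference recursion
    rw [zipStar_eq_map_col P mW.toNat hPnil hrows, scan_eq_cont P hPnil]
    -- A's side: the fold over Int column indices is the fold of pwStepN over Nat indices
    have hrange : PySem.List.pyRange 0 mW 1
        = (List.range mW.toNat).map (fun k : Nat => (k : Int)) := by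
      conv_lhs => rw [hcast]
      exact PySem.List.pyRange_zero_natCast _
    rw [hrange, List.foldl_map]
    have hstep : (fun (st : List (List Int × String) × List Int) (k : Nat) =>
        if (PySem.List.pyRange 0 (PySem.List.len P) 1).any
            (fun row => PySem.List.pyGetD (PySem.List.pyGetD P row []) (↑k) ' ' != ' ')
        then (st.1, st.2 ++ [(↑k : Int)])
        else if st.2 ≠ [] then (st.1 ++ [extract_problem P st.2], [])
        else st) = pwStepN P := by
      funext st k
      rw [PySem.List.len_eq, PySem.List.pyRange_zero_natCast, List.any_map]
      simp only [Function.comp_def, PySem.List.pyGetD_natCast]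
      rw [range_any_getD P [] (fun row => row.getD k ' ' != ' ')]
      rfl
    rw [hstep]
    simpa using fold_eq_cont P (List.range mW.toNat) [] []

-- ===== VERDICT (by name: the statement is the Claim_ definition above) =====
theorem parse_worksheet_spec : Claim_equal_parse_worksheet := by
  intro input _dom _pre
  unfold Spec_parse_worksheet
  exact ports_agree input
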